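-- pv_equiv track=rewrite | github.com/rywit/parkedinbrooklyn.com | python/render_other.py | build_plate_rows
-- ===== SOURCE A (Python) =====
-- def build_plate_rows(pics):
--     rows = []
--     cur_row = []
--
--     for pic in pics:
--         cur_row.append({"file_name": pic})
--
--         if len(cur_row) == 3:
--             rows.append(cur_row.copy())
--             cur_row = []
--
--     if len(cur_row) > 0:
--         rows.append(cur_row.copy())
--
--     return rows
-- ===== SOURCE B (Python) =====
-- def build_plate_rows(pics):
--     rows = []
--     i = 0
--     n = len(pics)
--     while i < n:
--         rows.append([{"file_name": p} for p in pics[i:i+3]])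
--         i += 3
--     return rows
-- ===== Notes on version B (the rewrite author's own statement) =====
-- stated objective: simpler
-- what changed: Replaces A's running buffer with its flush-when-length-3 branch, .copy() calls and trailing leftover append by an index loop that slices each chunk of three out of the list directly, so the short final chunk falls out of the last slice.
import Mathlib
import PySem

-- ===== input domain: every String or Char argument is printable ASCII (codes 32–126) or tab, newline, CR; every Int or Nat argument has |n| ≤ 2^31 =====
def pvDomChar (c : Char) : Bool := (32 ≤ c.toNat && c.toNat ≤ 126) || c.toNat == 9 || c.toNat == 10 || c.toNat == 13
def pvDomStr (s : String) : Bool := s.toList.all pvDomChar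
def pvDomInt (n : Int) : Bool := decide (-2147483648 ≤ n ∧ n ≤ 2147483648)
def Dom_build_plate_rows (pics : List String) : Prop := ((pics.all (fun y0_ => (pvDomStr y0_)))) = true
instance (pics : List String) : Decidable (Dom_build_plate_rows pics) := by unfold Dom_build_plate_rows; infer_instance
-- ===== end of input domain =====

-- B replaces A's running buffer with its flush-on-3 branch, .copy() calls and trailing
-- leftover append by an index loop that slices out each chunk of three directly (objective: simpler).

-- ===== PORT A =====
-- loop body of A's for-loop: state = (rows, cur_row)
def pvStepA (st : List (List (List (String × String))) × List (List (String × String)))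
    (pic : String) : List (List (List (String × String))) × List (List (String × String)) :=
  let cur := st.2 ++ [[("file_name", pic)]]
  if cur.length = 3 then (st.1 ++ [cur], []) else (st.1, cur)

def build_plate_rows (pics : List String) : List (List (List (String × String))) :=
  let st := pics.foldl pvStepA ([], [])
  if st.2.length > 0 then st.1 ++ [st.2] else st.1

-- ===== PORT B =====
-- B's while-loop: while i < n: rows.append([{"file_name": p} for p in pics[i:i+3]]); i += 3
def pvLoopB (pics : List String) (i : Int) (rows : List (List (List (String × String)))) :
    List (List (List (String × String))) :=
  if i < (pics.length : Int) then
    pvLoopB pics (i + 3)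
      (rows ++ [(PySem.List.slice pics (some i) (some (i + 3))).map (fun p => [("file_name", p)])])
  else rows
termination_by ((pics.length : Int) - i).toNat
decreasing_by omega

def build_plate_rows_alt (pics : List String) : List (List (List (String × String))) :=
  pvLoopB pics 0 []

-- ===== PRECONDITION & SPEC =====
def Spec_build_plate_rows (pics : List String) (out : List (List (List (String × String)))) : Prop := out = build_plate_rows_alt pics
instance (pics : List String) (out : List (List (List (String × String)))) : Decidable (Spec_build_plate_rows pics out) := by unfold Spec_build_plate_rows; infer_instance

-- ===== CLAIM (what is proved, stated in full; the proofs are below) =====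
def Claim_equal_build_plate_rows : Prop := ∀ (pics : List String), Dom_build_plate_rows pics → Spec_build_plate_rows pics (build_plate_rows pics)

-- ===== LEMMAS AND PROOFS =====

-- reference chunking both ports are reduced to
def pvChunk3 (pics : List String) : List (List (List (String × String))) :=
  match pics with
  | [] => []
  | p :: rest => ((p :: rest).take 3).map (fun q => [("file_name", q)]) :: pvChunk3 ((p :: rest).drop 3)
termination_by pics.length
decreasing_by simp

-- the trailing "if len(cur_row) > 0" of A
def pvFinishA (st : List (List (List (String × String))) × List (List (String × String))) :
    List (List (List (String × String))) :=
  if st.2.length > 0 then st.1 ++ [st.2] else st.1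

lemma mainA (n : Nat) : ∀ (pics : List String) (rows : List (List (List (String × String)))),
    pics.length ≤ n →
    pvFinishA (pics.foldl pvStepA (rows, [])) = rows ++ pvChunk3 pics := by
  induction n with
  | zero =>
      intro pics rows h
      have : pics = [] := by cases pics <;> simp_all
      subst this
      simp [pvFinishA, pvChunk3]
  | succ n ih =>
      intro pics rows h
      match pics with
      | [] => simp [pvFinishA, pvChunk3]
      | [a] => simp [pvFinishA, pvStepA, pvChunk3]
      | [a, b] => simp [pvFinishA, pvStepA, pvChunk3]
      | a :: b :: c :: t =>
          have h3 :
              (a :: b :: c :: t).foldl pvStepA (rows, []) =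
                t.foldl pvStepA
                  (rows ++ [[[("file_name", a)], [("file_name", b)], [("file_name", c)]]], []) := by
            simp [pvStepA]
          rw [h3, ih t _ (by simp at h ⊢; omega)]
          simp [pvChunk3]

lemma mainB (k : Nat) : ∀ (pics : List String) (i : Int) (rows : List (List (List (String × String)))),
    0 ≤ i → ((pics.length : Int) - i).toNat ≤ k →
    pvLoopB pics i rows = rows ++ pvChunk3 (pics.drop i.toNat) := by
  induction k with
  | zero =>
      intro pics i rows hi hk
      have hge : (pics.length : Int) ≤ i := by omega
      rw [pvLoopB]
      have hdrop : pics.drop i.toNat = [] := by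
        apply List.drop_eq_nil_of_le; omega
      simp [hdrop, pvChunk3, if_neg (by omega : ¬ i < (pics.length : Int))]
  | succ k ih =>
      intro pics i rows hi hk
      rw [pvLoopB]
      by_cases hlt : i < (pics.length : Int)
      · rw [if_pos hlt, ih pics (i + 3) _ (by omega) (by omega)]
        have hslice : PySem.List.slice pics (some i) (some (i + 3)) = (pics.drop i.toNat).take 3 := by
          rw [PySem.List.slice_toNat pics hi (by omega)]
          congr 1
          omega
        have hne : pics.drop i.toNat ≠ [] := by
          simp only [ne_eq, List.drop_eq_nil_iff]
          omega
        obtain ⟨p, rest, hpr⟩ := List.exists_cons_of_ne_nil hne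
        have hdrop2 : pics.drop (i + 3).toNat = (pics.drop i.toNat).drop 3 := by
          rw [List.drop_drop]
          congr 1
          omega
        rw [hslice, hdrop2, hpr]
        simp [pvChunk3]
      · rw [if_neg hlt]
        have hdrop : pics.drop i.toNat = [] := by
          apply List.drop_eq_nil_of_le; omega
        simp [hdrop, pvChunk3]

-- ===== VERDICT (by name: the statement is the Claim_ definition above) =====
theorem build_plate_rows_spec : Claim_equal_build_plate_rows := by
  intro pics _
  unfold Spec_build_plate_rows build_plate_rows build_plate_rows_alt
  rw [mainB pics.length pics 0 [] le_rfl (by omega)]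
  simpa [pvFinishA] using mainA pics.length pics [] le_rfl
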